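-- pv_equiv track=rewrite | github.com/benjbigot/CCM | scripts/extractContextCCM.py | buildCollocContext
-- ===== SOURCE A (Python) =====
-- def buildCollocContext(content):
-- 	'''
-- 	content = [[w1,w2,...][w1, w2,...]]
-- 	establishing collocation of 1-grams
-- 	retuns
-- 	globalLexicon (dict[collocation] => count)
-- 	contextAll (dict[lineIt][w1 w2] => distance  )
-- 	contextOut = [['w1 w2:dist', 'w1 w3:dist', ... ][ 'w1 w2:dist', 'w1 w3:dist',...]]
--
-- 	'''
--
-- 	contextAll = dict()
-- 	contextOut = list()
--
-- 	for lineNb, lineContent  in enumerate(content) :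
-- 		contextAll[lineNb] = dict()
--
-- 		for pos_w1 in range(0, len(lineContent)-1):
-- 			for pos_w2 in range (pos_w1 + 1, len(lineContent) ):
-- 				#~ print (pos_w1, pos_w2)
-- 				mot1 = lineContent[pos_w1]
-- 				mot2 = lineContent[pos_w2]
-- 				distance = abs(pos_w2 - pos_w1)
-- 				pattern = ' '.join([mot1, mot2])
-- 				if pattern not in contextAll[lineNb]:
-- 					contextAll[lineNb][pattern] = distance
-- 				elif abs(distance) <= abs(contextAll[lineNb][pattern]):
-- 					contextAll[lineNb][pattern] = distance
--
-- 		currentLine = list()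
-- 		for item in contextAll[lineNb] :
-- 			currentLine.append(item +"<COUNT>" + str(contextAll[lineNb][item]))
-- 		contextOut.append(currentLine)
--
-- 	return contextOut
-- ===== SOURCE B (Python) =====
-- def buildCollocContext(content):
--     out = []
--     for line in content:
--         occ = {}
--         for i, w in enumerate(line):
--             occ.setdefault(w, []).append(i)
--         best = {}
--         for w1, ps1 in occ.items():
--             seen = set()
--             for p2 in range(ps1[0] + 1, len(line)):
--                 w2 = line[p2]
--                 if w2 in seen:
--                     continue
--                 seen.add(w2)
--                 pat = w1 + " " + w2
--                 d = _minDist(ps1, occ[w2])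
--                 if pat not in best or d < best[pat]:
--                     best[pat] = d
--         out.append([p + "<COUNT>" + str(v) for p, v in best.items()])
--         best = None
--     return out
--
--
-- def _minDist(ps1, ps2):
--     best = None
--     i = 0
--     last = None
--     for p2 in ps2:
--         while i < len(ps1) and ps1[i] < p2:
--             last = ps1[i]
--             i += 1
--         if last is not None:
--             d = p2 - last
--             if best is None or d < best:
--                 best = d
--     return best
-- ===== Notes on version B (the rewrite author's own statement) =====
-- stated objective: alternative
-- what changed: B indexes each line's word-occurrence positions in one pass, emits every word pair once (first-seen scan per distinct first word) computing its minimal gap by a two-pointer merge of the two occurrence lists, and folds the entries into a pattern-keyed min-dict, instead of A's nested loop over all position pairs with a running-min dict update per pair.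
import Mathlib
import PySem

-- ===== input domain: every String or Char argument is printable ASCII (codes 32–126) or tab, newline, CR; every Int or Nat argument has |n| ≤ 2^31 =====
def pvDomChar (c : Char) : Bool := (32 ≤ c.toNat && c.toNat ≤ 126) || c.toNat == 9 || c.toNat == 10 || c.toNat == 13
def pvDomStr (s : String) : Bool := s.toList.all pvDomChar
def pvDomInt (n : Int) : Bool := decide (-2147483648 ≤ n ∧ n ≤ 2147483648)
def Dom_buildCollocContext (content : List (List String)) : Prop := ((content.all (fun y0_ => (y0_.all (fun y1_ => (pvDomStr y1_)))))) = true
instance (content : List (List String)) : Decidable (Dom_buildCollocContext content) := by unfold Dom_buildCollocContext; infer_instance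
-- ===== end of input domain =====

-- B computes each line from word-occurrence position lists (each word pair emitted once,
-- minimal gap by a two-pointer merge) instead of A's nested loop over all position pairs
-- (objective: alternative).

-- ===== PORT A =====
def buildCollocContext (content : List (List String)) : List (List String) :=
  ((PySem.List.enumerate content 0).foldl
    (fun (st : PySem.Dict Int (PySem.Dict String Int) × List (List String)) lp =>
      let lineNb := lp.1
      let lineContent := lp.2
      let contextAll := st.1.insert lineNb PySem.Dict.empty
      let contextAll :=
        (PySem.List.pyRange 0 ((lineContent.length : Int) - 1) 1).foldl
          (fun contextAll pos_w1 =>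
            (PySem.List.pyRange (pos_w1 + 1) (lineContent.length : Int) 1).foldl
              (fun contextAll pos_w2 =>
                let mot1 := PySem.List.pyGetD lineContent pos_w1 ""
                let mot2 := PySem.List.pyGetD lineContent pos_w2 ""
                let distance := |pos_w2 - pos_w1|
                let pattern := PySem.Str.join " " [mot1, mot2]
                let d := contextAll.getD lineNb PySem.Dict.empty
                if d.contains pattern = false then
                  contextAll.insert lineNb (d.insert pattern distance)
                else if |distance| ≤ |d.getD pattern 0| then
                  contextAll.insert lineNb (d.insert pattern distance)
                else contextAll)
              contextAll)
          contextAll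
      let d := contextAll.getD lineNb PySem.Dict.empty
      let currentLine := d.keys.foldl
        (fun cl item => cl ++ [item ++ "<COUNT>" ++ PySem.Int.toStr (d.getD item 0)]) []
      (contextAll, st.2 ++ [currentLine]))
    (PySem.Dict.empty, [])).2

-- ===== PORT B =====
-- the inner 'while i < len(ps1) and ps1[i] < p2' loop, as structural recursion on
-- the not-yet-consumed suffix of ps1 (exact: i only moves forward)
def pvAdvance : List Int → Option Int → Int → List Int × Option Int
  | [], last, _ => ([], last)
  | p :: rest, last, p2 => if p < p2 then pvAdvance rest (some p) p2 else (p :: rest, last)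

def pvMinDist (ps1 ps2 : List Int) : Option Int :=
  (ps2.foldl
    (fun (st : Option Int × List Int × Option Int) p2 =>
      let rl := pvAdvance st.2.1 st.2.2 p2
      match rl.2 with
      | none => (st.1, rl)
      | some l =>
        let d := p2 - l
        match st.1 with
        | none => (some d, rl)
        | some b => if d < b then (some d, rl) else (st.1, rl))
    (none, ps1, none)).1

def pvLineColloc (line : List String) : List String :=
  let occ := (PySem.List.enumerate line 0).foldl
      (fun (d : PySem.Dict String (List Int)) p => d.modify p.2 [] (· ++ [p.1])) PySem.Dict.empty
  let best := occ.items.foldl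
    (fun (best : PySem.Dict String Int) wp =>
      ((PySem.List.pyRange (PySem.List.pyGetD wp.2 0 0 + 1) (line.length : Int) 1).foldl
        (fun (st : PySem.Dict String Int × PySem.Set String) p2 =>
          let w2 := PySem.List.pyGetD line p2 ""
          if PySem.Set.contains st.2 w2 then st
          else
            let pat := wp.1 ++ " " ++ w2
            -- _minDist never returns None here (w2 occurs after wp.2[0]); '.getD 0' is that unreachable arm
            let d := (pvMinDist wp.2 (occ.getD w2 [])).getD 0
            if st.1.contains pat = false then (st.1.insert pat d, PySem.Set.add st.2 w2)
            else if d < st.1.getD pat 0 then (st.1.insert pat d, PySem.Set.add st.2 w2)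
            else (st.1, PySem.Set.add st.2 w2))
        (best, PySem.Set.empty)).1)
    PySem.Dict.empty
  best.items.map (fun pv => pv.1 ++ "<COUNT>" ++ PySem.Int.toStr pv.2)

def buildCollocContext_alt (content : List (List String)) : List (List String) :=
  content.foldl (fun out line => out ++ [pvLineColloc line]) []

-- ===== PRECONDITION & SPEC =====
def Spec_buildCollocContext (content : List (List String)) (out : List (List String)) : Prop := out = buildCollocContext_alt content
instance (content : List (List String)) (out : List (List String)) : Decidable (Spec_buildCollocContext content out) := by unfold Spec_buildCollocContext; infer_instance

-- ===== CLAIM (what is proved, stated in full; the proofs are below) =====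
def Claim_equal_buildCollocContext : Prop := ∀ (content : List (List String)), Dom_buildCollocContext content → Spec_buildCollocContext content (buildCollocContext content)

-- ===== LEMMAS AND PROOFS =====

-- ---------- proof-side notions ----------

-- 'w1 w2'
def pvPat (a b : String) : String := a ++ " " ++ b

-- all position pairs i < j of `line` in A's traversal order, as ((w1, w2), j - i)
def pvPairsW : List String → List ((String × String) × Int)
  | [] => []
  | w :: t => (PySem.List.enumerate t 1).map (fun p => ((w, p.2), p.1)) ++ pvPairsW t

def pvWPairs (l : List String) : List (String × String) := (pvPairsW l).map (·.1)

-- A's flat (pattern, distance) pair list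
def pvLA (l : List String) : List (String × Int) :=
  (pvPairsW l).map (fun q => (pvPat q.1.1 q.1.2, q.2))

-- occurrence positions of w in l, ascending, as Int
def pvIdxs : List String → String → List Int
  | [], _ => []
  | x :: t, w => (if x = w then [(0 : Int)] else []) ++ (pvIdxs t w).map (· + 1)

-- running min with optional accumulator
def pvOMin (o : Option Int) (vs : List Int) : Option Int :=
  vs.foldl (fun b v => match b with | none => some v | some x => some (min x v)) o

def pvPred (ps1 : List Int) (q : Int) : Option Int := (ps1.filter (· < q)).getLast?

def pvCand (ps1 ps2 : List Int) : List Int :=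
  ps2.filterMap (fun q => (pvPred ps1 q).map (fun l => q - l))

-- A's per-pair dict update, on the inner dict
def pvStepA (d : PySem.Dict String Int) (p : String × Int) : PySem.Dict String Int :=
  if d.contains p.1 = false then d.insert p.1 p.2
  else if |p.2| ≤ |d.getD p.1 0| then d.insert p.1 p.2 else d

-- B's dict update
def pvStepB (d : PySem.Dict String Int) (p : String × Int) : PySem.Dict String Int :=
  if d.contains p.1 = false then d.insert p.1 p.2
  else if p.2 < d.getD p.1 0 then d.insert p.1 p.2 else d

-- canonical min-insert both reduce to (on positive values)
def pvStepM (d : PySem.Dict String Int) (p : String × Int) : PySem.Dict String Int :=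
  if d.contains p.1 = false then d.insert p.1 p.2
  else d.insert p.1 (min (d.getD p.1 0) p.2)

-- B's generated word pairs, grouped by first word in first-occurrence order
def pvGroupPairs (l : List String) : List (String × String) :=
  (PySem.List.dedup l).flatMap (fun w1 =>
    (PySem.List.dedup (l.drop (l.idxOf w1 + 1))).map (fun w2 => (w1, w2)))

-- B's flat (pattern, min distance) entry list
def pvGroups (l : List String) : List (String × Int) :=
  (pvGroupPairs l).map (fun wp =>
    (pvPat wp.1 wp.2, (pvMinDist (pvIdxs l wp.1) (pvIdxs l wp.2)).getD 0))

-- A's inner double loop acting on the inner dict only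
def pvInner (line : List String) (pos_w1 : Int) (d : PySem.Dict String Int) : PySem.Dict String Int :=
  (PySem.List.pyRange (pos_w1 + 1) (line.length : Int) 1).foldl
    (fun d pos_w2 =>
      pvStepA d (PySem.Str.join " " [PySem.List.pyGetD line pos_w1 "", PySem.List.pyGetD line pos_w2 ""],
                 |pos_w2 - pos_w1|)) d

def pvDouble (line : List String) (d : PySem.Dict String Int) : PySem.Dict String Int :=
  (PySem.List.pyRange 0 ((line.length : Int) - 1) 1).foldl (fun d pos_w1 => pvInner line pos_w1 d) d

def pvALine (line : List String) : List String :=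
  (pvDouble line PySem.Dict.empty).keys.map
    (fun k => k ++ "<COUNT>" ++ PySem.Int.toStr ((pvDouble line PySem.Dict.empty).getD k 0))

-- ---------- small generic lemmas ----------

theorem pvPatJoin (a b : String) : PySem.Str.join " " [a, b] = pvPat a b := by
  rw [← String.toList_inj, PySem.Str.toList_join]
  simp [pvPat, PySem.Chars.join, String.toList_append, List.intercalate]

theorem pvFoldlFlatMap {α β γ : Type} (g : α → List β) (l : List α) (f : γ → β → γ) (init : γ) :
    (l.flatMap g).foldl f init = l.foldl (fun acc x => (g x).foldl f acc) init := by
  induction l generalizing init with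
  | nil => rfl
  | cons x l ih => simp only [List.flatMap_cons, List.foldl_append, List.foldl_cons, ih]

-- ---------- dict fold characterization ----------

theorem pvStepM_single_keys (d : PySem.Dict String Int) (p : String × Int) :
    (pvStepM d p).keys = PySem.Set.add d.keys p.1 := by
  unfold pvStepM
  by_cases hc : d.contains p.1
  · rw [if_neg (by simp [hc]), PySem.Dict.keys_insert_of_contains _ _ hc,
      PySem.Set.add_of_mem ((PySem.Dict.contains_iff_mem_keys d p.1).mp hc)]
  · rw [if_pos (by simpa using hc), PySem.Dict.keys_insert_of_not_contains _ _ (by simpa using hc),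
      PySem.Set.add_of_not_mem (fun hm => hc ((PySem.Dict.contains_iff_mem_keys d p.1).mpr hm))]

theorem pvStepM_keys (L : List (String × Int)) (d : PySem.Dict String Int) :
    (L.foldl pvStepM d).keys = PySem.Set.update d.keys (L.map (·.1)) := by
  induction L generalizing d with
  | nil => rw [List.foldl_nil, List.map_nil, PySem.Set.update_nil]
  | cons p L ih =>
    rw [List.foldl_cons, List.map_cons, PySem.Set.update_cons, ih, pvStepM_single_keys]

theorem pvStepM_single_get? (d : PySem.Dict String Int) (p : String × Int) (k : String) :
    (pvStepM d p).get? k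
      = if p.1 = k then (match d.get? k with
          | none => some p.2
          | some x => some (min x p.2)) else d.get? k := by
  unfold pvStepM
  by_cases hc : d.contains p.1
  · have hs : (d.get? p.1).isSome := by
      rw [← PySem.Dict.contains_eq_isSome_get? d p.1]; exact hc
    rcases Option.isSome_iff_exists.mp hs with ⟨v, hv⟩
    rw [if_neg (by simp [hc]), PySem.Dict.get?_insert,
      PySem.Dict.getD_of_get?_eq_some _ _ hv]
    by_cases hk : p.1 = k
    · subst hk; simp [hv]
    · rw [if_neg (fun h => hk h.symm), if_neg hk]
  · rw [if_pos (by simpa using hc), PySem.Dict.get?_insert]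
    by_cases hk : p.1 = k
    · subst hk
      rw [(PySem.Dict.get?_eq_none_iff_contains d p.1).mpr (by simpa using hc)]
    · rw [if_neg (fun h => hk h.symm), if_neg hk]

theorem pvOMin_step (o : Option Int) (v : Int) (vs : List Int) :
    pvOMin o (v :: vs) = pvOMin (match o with | none => some v | some x => some (min x v)) vs := rfl

theorem pvStepM_get? (L : List (String × Int)) (d : PySem.Dict String Int) (k : String) :
    (L.foldl pvStepM d).get? k
      = pvOMin (d.get? k) ((L.filter (fun p => p.1 == k)).map (·.2)) := by
  induction L generalizing d with
  | nil => simp [pvOMin]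
  | cons p L ih =>
    rw [List.foldl_cons, ih]
    by_cases hk : p.1 = k
    · rw [List.filter_cons_of_pos (by simpa using hk), List.map_cons, pvOMin_step,
        pvStepM_single_get?, if_pos hk]
    · rw [List.filter_cons_of_neg (by simpa using hk), pvStepM_single_get?, if_neg hk]

theorem pvValuesPos {d : PySem.Dict String Int} (hd : ∀ v ∈ d.values, 0 < v)
    {k : String} (hk : d.contains k = true) : 0 < d.getD k 0 := by
  have hs : (d.get? k).isSome := by
    rw [← PySem.Dict.contains_eq_isSome_get? d k]; exact hk
  rcases Option.isSome_iff_exists.mp hs with ⟨v, hv⟩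
  rw [PySem.Dict.getD_of_get?_eq_some _ _ hv]
  refine hd v ?_
  have := PySem.Dict.mem_items_of_get?_eq_some d hv
  exact List.mem_map_of_mem this

theorem pvStepM_single_pos (d : PySem.Dict String Int) (p : String × Int)
    (hp : 0 < p.2) (hd : ∀ v ∈ d.values, 0 < v) :
    ∀ v ∈ (pvStepM d p).values, 0 < v := by
  intro v hv
  unfold pvStepM at hv
  by_cases hc : d.contains p.1
  · rw [if_neg (by simp [hc])] at hv
    rcases PySem.Dict.mem_values_insert _ _ _ _ hv with rfl | hv
    · exact lt_min (pvValuesPos hd hc) hp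
    · exact hd v hv
  · rw [if_pos (by simpa using hc)] at hv
    rcases PySem.Dict.mem_values_insert _ _ _ _ hv with rfl | hv
    · exact hp
    · exact hd v hv

theorem pvInsert_same (d : PySem.Dict String Int) (k : String)
    (hnd : d.keys.Nodup) (hc : d.contains k = true) :
    d.insert k (d.getD k 0) = d := by
  apply PySem.Dict.ext
  rw [PySem.Dict.items_insert_of_contains _ _ hc]
  conv_rhs => rw [← List.map_id d.items]
  refine List.map_congr_left (fun q hq => ?_)
  by_cases hqk : q.1 = k
  · rw [if_pos (by simpa using hqk)]
    have : d.getD q.1 0 = q.2 := PySem.Dict.getD_of_mem_items d (by exact hq) hnd 0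
    rw [← hqk, this, id_eq]
  · rw [if_neg (by simpa using hqk), id_eq]

theorem pvStepM_nodup (d : PySem.Dict String Int) (p : String × Int) (hnd : d.keys.Nodup) :
    (pvStepM d p).keys.Nodup := by
  unfold pvStepM
  split_ifs <;> exact PySem.Dict.nodup_keys_insert _ _ _ hnd

theorem pvStepA_eq_M (L : List (String × Int)) (d : PySem.Dict String Int)
    (hL : ∀ p ∈ L, 0 < p.2) (hd : ∀ v ∈ d.values, 0 < v) (hnd : d.keys.Nodup) :
    L.foldl pvStepA d = L.foldl pvStepM d := by
  induction L generalizing d with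
  | nil => rfl
  | cons p L ih =>
    have hp := hL p List.mem_cons_self
    have hstep : pvStepA d p = pvStepM d p := by
      unfold pvStepA pvStepM
      by_cases hc : d.contains p.1
      · have hcur : 0 < d.getD p.1 0 := pvValuesPos hd hc
        rw [if_neg (c := d.contains p.1 = false) (by simp [hc]),
          if_neg (c := d.contains p.1 = false) (by simp [hc])]
        by_cases hle : p.2 ≤ d.getD p.1 0
        · rw [if_pos (c := |p.2| ≤ |d.getD p.1 0|) (by rw [abs_of_pos hp, abs_of_pos hcur]; omega),
            min_eq_right hle]
        · rw [if_neg (c := |p.2| ≤ |d.getD p.1 0|) (by rw [abs_of_pos hp, abs_of_pos hcur]; omega),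
            min_eq_left (by omega)]
          exact (pvInsert_same d p.1 hnd hc).symm
      · rw [if_pos (c := d.contains p.1 = false) (by simpa using hc),
          if_pos (c := d.contains p.1 = false) (by simpa using hc)]
    rw [List.foldl_cons, List.foldl_cons, hstep]
    exact ih _ (fun q hq => hL q (List.mem_cons_of_mem _ hq))
      (pvStepM_single_pos d p hp hd) (pvStepM_nodup d p hnd)

theorem pvStepB_eq_M (L : List (String × Int)) (d : PySem.Dict String Int)
    (hL : ∀ p ∈ L, 0 < p.2) (hd : ∀ v ∈ d.values, 0 < v) (hnd : d.keys.Nodup) :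
    L.foldl pvStepB d = L.foldl pvStepM d := by
  induction L generalizing d with
  | nil => rfl
  | cons p L ih =>
    have hp := hL p List.mem_cons_self
    have hstep : pvStepB d p = pvStepM d p := by
      unfold pvStepB pvStepM
      by_cases hc : d.contains p.1
      · rw [if_neg (c := d.contains p.1 = false) (by simp [hc]),
          if_neg (c := d.contains p.1 = false) (by simp [hc])]
        by_cases hlt : p.2 < d.getD p.1 0
        · rw [if_pos (c := p.2 < d.getD p.1 0) hlt, min_eq_right (by omega)]
        · rw [if_neg (c := p.2 < d.getD p.1 0) hlt, min_eq_left (by omega)]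
          exact (pvInsert_same d p.1 hnd hc).symm
      · rw [if_pos (c := d.contains p.1 = false) (by simpa using hc),
          if_pos (c := d.contains p.1 = false) (by simpa using hc)]
    rw [List.foldl_cons, List.foldl_cons, hstep]
    exact ih _ (fun q hq => hL q (List.mem_cons_of_mem _ hq))
      (pvStepM_single_pos d p hp hd) (pvStepM_nodup d p hnd)

-- ---------- side A: reduction to the flat pair list ----------

theorem pvIte2 {α β : Type} (f : α → β) (c1 c2 : Prop) [Decidable c1] [Decidable c2] (x y z : α) :
    (if c1 then f x else if c2 then f y else f z) = f (if c1 then x else if c2 then y else z) := by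
  split_ifs <;> rfl

theorem pvA_nest_inner (line : List String) (pos_w1 : Int) (l : List Int)
    (ca : PySem.Dict Int (PySem.Dict String Int)) (k : Int) (d : PySem.Dict String Int) :
    l.foldl
      (fun contextAll pos_w2 =>
        if (contextAll.getD k PySem.Dict.empty).contains
            (PySem.Str.join " " [PySem.List.pyGetD line pos_w1 "", PySem.List.pyGetD line pos_w2 ""]) = false then
          contextAll.insert k ((contextAll.getD k PySem.Dict.empty).insert
            (PySem.Str.join " " [PySem.List.pyGetD line pos_w1 "", PySem.List.pyGetD line pos_w2 ""])
            |pos_w2 - pos_w1|)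
        else if |(|pos_w2 - pos_w1|)| ≤
            |(contextAll.getD k PySem.Dict.empty).getD
              (PySem.Str.join " " [PySem.List.pyGetD line pos_w1 "", PySem.List.pyGetD line pos_w2 ""]) 0| then
          contextAll.insert k ((contextAll.getD k PySem.Dict.empty).insert
            (PySem.Str.join " " [PySem.List.pyGetD line pos_w1 "", PySem.List.pyGetD line pos_w2 ""])
            |pos_w2 - pos_w1|)
        else contextAll)
      (ca.insert k d)
    = ca.insert k (l.foldl
        (fun d pos_w2 =>
          pvStepA d (PySem.Str.join " " [PySem.List.pyGetD line pos_w1 "", PySem.List.pyGetD line pos_w2 ""],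
                     |pos_w2 - pos_w1|)) d) := by
  induction l generalizing d with
  | nil => rfl
  | cons j l ih =>
    rw [List.foldl_cons, List.foldl_cons]
    simp only [PySem.Dict.getD_insert_self, PySem.Dict.insert_insert_self,
      pvIte2 (ca.insert k ·)]
    exact ih _

theorem pvA_nest_aux (line : List String) (k : Int) (l : List Int) :
    ∀ (ca : PySem.Dict Int (PySem.Dict String Int)) (d : PySem.Dict String Int),
    l.foldl
      (fun contextAll pos_w1 =>
        (PySem.List.pyRange (pos_w1 + 1) (line.length : Int) 1).foldl
          (fun contextAll pos_w2 =>
            if (contextAll.getD k PySem.Dict.empty).contains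
                (PySem.Str.join " " [PySem.List.pyGetD line pos_w1 "", PySem.List.pyGetD line pos_w2 ""]) = false then
              contextAll.insert k ((contextAll.getD k PySem.Dict.empty).insert
                (PySem.Str.join " " [PySem.List.pyGetD line pos_w1 "", PySem.List.pyGetD line pos_w2 ""])
                |pos_w2 - pos_w1|)
            else if |(|pos_w2 - pos_w1|)| ≤
                |(contextAll.getD k PySem.Dict.empty).getD
                  (PySem.Str.join " " [PySem.List.pyGetD line pos_w1 "", PySem.List.pyGetD line pos_w2 ""]) 0| then
              contextAll.insert k ((contextAll.getD k PySem.Dict.empty).insert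
                (PySem.Str.join " " [PySem.List.pyGetD line pos_w1 "", PySem.List.pyGetD line pos_w2 ""])
                |pos_w2 - pos_w1|)
            else contextAll)
          contextAll)
      (ca.insert k d)
    = ca.insert k (l.foldl (fun d pos_w1 => pvInner line pos_w1 d) d) := by
  induction l with
  | nil => intro ca d; rfl
  | cons p1 l ih =>
    intro ca d
    rw [List.foldl_cons, List.foldl_cons, pvA_nest_inner line p1 _ ca k d]
    exact ih ca _

theorem pvA_map_aux (cs : List (List String)) :
    ∀ (s : Int) (ca : PySem.Dict Int (PySem.Dict String Int)) (acc : List (List String)),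
    ((PySem.List.enumerate cs s).foldl
      (fun (st : PySem.Dict Int (PySem.Dict String Int) × List (List String)) lp =>
        let lineNb := lp.1
        let lineContent := lp.2
        let contextAll := st.1.insert lineNb PySem.Dict.empty
        let contextAll :=
          (PySem.List.pyRange 0 ((lineContent.length : Int) - 1) 1).foldl
            (fun contextAll pos_w1 =>
              (PySem.List.pyRange (pos_w1 + 1) (lineContent.length : Int) 1).foldl
                (fun contextAll pos_w2 =>
                  let mot1 := PySem.List.pyGetD lineContent pos_w1 ""
                  let mot2 := PySem.List.pyGetD lineContent pos_w2 ""
                  let distance := |pos_w2 - pos_w1|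
                  let pattern := PySem.Str.join " " [mot1, mot2]
                  let d := contextAll.getD lineNb PySem.Dict.empty
                  if d.contains pattern = false then
                    contextAll.insert lineNb (d.insert pattern distance)
                  else if |distance| ≤ |d.getD pattern 0| then
                    contextAll.insert lineNb (d.insert pattern distance)
                  else contextAll)
                contextAll)
            contextAll
        let d := contextAll.getD lineNb PySem.Dict.empty
        let currentLine := d.keys.foldl
          (fun cl item => cl ++ [item ++ "<COUNT>" ++ PySem.Int.toStr (d.getD item 0)]) []
        (contextAll, st.2 ++ [currentLine]))
      (ca, acc)).2 = acc ++ cs.map pvALine := by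
  induction cs with
  | nil => intro s ca acc; simp [PySem.List.enumerate]
  | cons c cs ih =>
    intro s ca acc
    rw [PySem.List.enumerate_cons, List.foldl_cons]
    have hnest := pvA_nest_aux c s (PySem.List.pyRange 0 ((c.length : Int) - 1) 1) ca PySem.Dict.empty
    simp only []
    rw [hnest, PySem.Dict.getD_insert_self, PySem.List.foldl_append_singleton_eq_map,
      List.nil_append, ih (s + 1), List.append_assoc]
    rfl

theorem pvA_map (content : List (List String)) :
    buildCollocContext content = content.map pvALine := by
  have h := pvA_map_aux content 0 PySem.Dict.empty []
  rw [List.nil_append] at h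
  exact h

theorem pvRange_shift (a b : Int) :
    PySem.List.pyRange (a + 1) (b + 1) 1 = (PySem.List.pyRange a b 1).map (· + 1) := by
  rw [PySem.List.pyRange_one, PySem.List.pyRange_one, List.map_map]
  rw [show b + 1 - (a + 1) = b - a by ring]
  exact List.map_congr_left (fun k _ => by simp [Function.comp]; ring)

theorem pvGetD_cons_succ (x : String) (t : List String) (j : Int) (hj : 0 ≤ j) :
    PySem.List.pyGetD (x :: t) (j + 1) "" = PySem.List.pyGetD t j "" := by
  obtain ⟨n, rfl⟩ := Int.eq_ofNat_of_zero_le hj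
  rw [show ((n : Int) + 1) = ((n + 1 : Nat) : Int) by push_cast; ring]
  rw [PySem.List.pyGetD_natCast, PySem.List.pyGetD_natCast]
  rfl

theorem pvLA_cons (w : String) (t : List String) :
    pvLA (w :: t) = (PySem.List.enumerate t 1).map (fun p => (pvPat w p.2, p.1)) ++ pvLA t := by
  unfold pvLA
  rw [show pvPairsW (w :: t) = (PySem.List.enumerate t 1).map (fun p => ((w, p.2), p.1)) ++ pvPairsW t from rfl,
    List.map_append, List.map_map]
  rfl

theorem pvInner_head (w : String) (t : List String) (d : PySem.Dict String Int) :
    pvInner (w :: t) 0 d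
      = ((PySem.List.enumerate t 1).map (fun p => (pvPat w p.2, p.1))).foldl pvStepA d := by
  unfold pvInner
  have h0 : PySem.List.pyGetD (w :: t) 0 "" = w := by
    rw [show (0 : Int) = ((0 : Nat) : Int) from rfl, PySem.List.pyGetD_natCast]; rfl
  have hlist : PySem.List.pyRange (0 + 1) (((w :: t).length : Int)) 1
      = (PySem.List.enumerate t 1).map (·.1) := by
    rw [PySem.List.map_fst_enumerate]
    norm_num [List.length_cons]
    ring_nf
  rw [hlist, List.foldl_map, List.foldl_map]
  refine PySem.List.foldl_congr_mem _ _ _ _ (fun acc p hp => ?_)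
  rcases (PySem.List.mem_enumerate_iff _ _ _).mp hp with ⟨k, hk, rfl⟩
  have hget : PySem.List.pyGetD (w :: t) ((1 : Int) + (k : Int)) "" = t[k] := by
    rw [show (1 : Int) + (k : Int) = ((k + 1 : Nat) : Int) by push_cast; ring,
      PySem.List.pyGetD_natCast, List.getD_cons_succ, List.getD_eq_getElem t "" hk]
  have habs : |(1 : Int) + (k : Int) - 0| = 1 + (k : Int) := by
    rw [sub_zero, abs_of_nonneg (by positivity)]
  rw [h0, hget, pvPatJoin, habs]

theorem pvInner_shift (w : String) (t : List String) (q : Int) (hq : 0 ≤ q)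
    (d : PySem.Dict String Int) :
    pvInner (w :: t) (q + 1) d = pvInner t q d := by
  unfold pvInner
  have hrange : PySem.List.pyRange (q + 1 + 1) (((w :: t).length : Int)) 1
      = (PySem.List.pyRange (q + 1) ((t.length : Int)) 1).map (· + 1) := by
    rw [show (((w :: t).length : Int)) = ((t.length : Int)) + 1 by
      rw [List.length_cons]; push_cast; ring]
    exact pvRange_shift (q + 1) ((t.length : Int))
  rw [hrange, List.foldl_map]
  refine PySem.List.foldl_congr_mem _ _ _ _ (fun acc r hr => ?_)
  have hr' := PySem.List.mem_pyRange_one.mp hr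
  rw [pvGetD_cons_succ w t q hq, pvGetD_cons_succ w t r (by omega),
    show r + 1 - (q + 1) = r - q by ring]

theorem pvDouble_eq_flat (line : List String) (d : PySem.Dict String Int) :
    pvDouble line d = (pvLA line).foldl pvStepA d := by
  induction line generalizing d with
  | nil =>
    unfold pvDouble
    rw [PySem.List.pyRange_one_eq_nil (by norm_num)]
    rfl
  | cons w t ih =>
    rcases t with _ | ⟨b, t'⟩
    · unfold pvDouble
      rw [PySem.List.pyRange_one_eq_nil (by norm_num)]
      rfl
    · unfold pvDouble
      have hb : (0 : Int) < (((w :: b :: t').length : Int)) - 1 := by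
        rw [List.length_cons, List.length_cons]; push_cast; omega
      rw [PySem.List.pyRange_one_cons hb, List.foldl_cons, pvInner_head w (b :: t') d]
      have hrest : PySem.List.pyRange (0 + 1) ((((w :: b :: t').length : Int)) - 1) 1
          = (PySem.List.pyRange 0 (((b :: t').length : Int) - 1) 1).map (· + 1) := by
        rw [show (((w :: b :: t').length : Int)) - 1 = ((((b :: t').length : Int)) - 1) + 1 by
          rw [List.length_cons]; push_cast; ring]
        exact pvRange_shift 0 _
      rw [hrest, List.foldl_map]
      have hcong := PySem.List.foldl_congr_mem
        (PySem.List.pyRange 0 ((((b :: t').length : Int)) - 1) 1)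
        (fun acc q => pvInner (w :: b :: t') (q + 1) acc)
        (fun acc q => pvInner (b :: t') q acc)
        (((PySem.List.enumerate (b :: t') 1).map (fun p => (pvPat w p.2, p.1))).foldl pvStepA d)
        (fun acc q hq => pvInner_shift w (b :: t') q (PySem.List.mem_pyRange_one.mp hq).1 acc)
      rw [hcong]
      have hdd : (PySem.List.pyRange 0 ((((b :: t').length : Int)) - 1) 1).foldl
          (fun acc q => pvInner (b :: t') q acc)
          (((PySem.List.enumerate (b :: t') 1).map (fun p => (pvPat w p.2, p.1))).foldl pvStepA d)
          = pvDouble (b :: t')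
            (((PySem.List.enumerate (b :: t') 1).map (fun p => (pvPat w p.2, p.1))).foldl pvStepA d) := rfl
      rw [hdd, ih, ← List.foldl_append, ← pvLA_cons]

-- ---------- side B: reduction to the flat entry list ----------

theorem pvIdxs_spec (l : List String) (w : String) (x : Int) :
    x ∈ pvIdxs l w ↔ ∃ i : Nat, ∃ h : i < l.length, l[i] = w ∧ x = (i : Int) := by
  induction l generalizing x with
  | nil => simp [pvIdxs]
  | cons a t ih =>
    simp only [pvIdxs, List.mem_append, List.mem_map, List.mem_ite_nil_right, List.mem_singleton, ih]
    constructor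
    · rintro (⟨haw, rfl⟩ | ⟨y, ⟨i, hi, hli, rfl⟩, rfl⟩)
      · exact ⟨0, by simp, by simpa using haw, rfl⟩
      · exact ⟨i + 1, by simpa using Nat.succ_lt_succ hi, by simpa using hli, by push_cast; ring⟩
    · rintro ⟨i, hi, hli, rfl⟩
      cases i with
      | zero => exact Or.inl ⟨by simpa using hli, rfl⟩
      | succ i =>
        exact Or.inr ⟨i, ⟨i, by simpa using hi, by simpa using hli⟩, by push_cast; ring⟩

theorem pvIdxs_nonneg (l : List String) (w : String) : ∀ x ∈ pvIdxs l w, 0 ≤ x := by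
  intro x hx
  rcases (pvIdxs_spec l w x).mp hx with ⟨i, _, _, rfl⟩
  positivity

theorem pvIdxs_sorted (l : List String) (w : String) : (pvIdxs l w).Pairwise (· < ·) := by
  induction l with
  | nil => simp [pvIdxs]
  | cons a t ih =>
    have hmap : ((pvIdxs t w).map (· + 1)).Pairwise (· < ·) :=
      ih.map _ (fun x y h => by omega)
    unfold pvIdxs
    refine List.pairwise_append.mpr ⟨?_, hmap, ?_⟩
    · split_ifs <;> simp
    · intro x hx y hy
      rcases List.mem_map.mp hy with ⟨z, hz, rfl⟩
      have hz0 := pvIdxs_nonneg t w z hz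
      have : x = 0 := by
        rcases List.mem_ite_nil_right.mp hx with ⟨_, h0⟩
        simpa using h0
      omega

theorem pvIdxs_ne_nil (l : List String) (w : String) (hw : w ∈ l) : pvIdxs l w ≠ [] := by
  have : (w ∈ l) := hw
  rcases List.getElem_of_mem this with ⟨i, hi, hli⟩
  have : (i : Int) ∈ pvIdxs l w := (pvIdxs_spec l w i).mpr ⟨i, hi, hli, rfl⟩
  exact List.ne_nil_of_mem this

theorem pvIdxs_head (l : List String) (w : String) (hw : w ∈ l) :
    PySem.List.pyGetD (pvIdxs l w) 0 0 = (l.idxOf w : Int) := by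
  induction l with
  | nil => cases hw
  | cons a t ih =>
    by_cases haw : a = w
    · subst haw
      simp only [pvIdxs, List.idxOf_cons_self]
      norm_num
    · have hwt : w ∈ t := by rcases List.mem_cons.mp hw with rfl | h; exact absurd rfl haw; exact h
      rcases List.exists_cons_of_ne_nil (pvIdxs_ne_nil t w hwt) with ⟨r0, rs, hr⟩
      simp only [pvIdxs, if_neg haw, List.nil_append, hr, List.map_cons]
      have h1 : PySem.List.pyGetD ((r0 + 1) :: rs.map (· + 1)) 0 0 = r0 + 1 := by
        rw [show (0 : Int) = ((0 : Nat) : Int) from rfl, PySem.List.pyGetD_natCast]; rfl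
      have h2 : PySem.List.pyGetD (r0 :: rs) 0 0 = r0 := by
        rw [show (0 : Int) = ((0 : Nat) : Int) from rfl, PySem.List.pyGetD_natCast]; rfl
      rw [h1, List.idxOf_cons_ne _ haw]
      have := ih hwt
      rw [hr, h2] at this
      push_cast
      omega

theorem pvOccAux (l : List String) (w : String) : ∀ s : Int,
    ((PySem.List.enumerate l s).filter (fun p => p.2 == w)).map (·.1)
      = (pvIdxs l w).map (· + s) := by
  induction l with
  | nil => intro s; rfl
  | cons a t ih =>
    intro s
    rw [PySem.List.enumerate_cons]
    by_cases haw : a = w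
    · rw [List.filter_cons_of_pos (by simpa using haw), List.map_cons]
      simp only [pvIdxs, if_pos haw, List.singleton_append, List.map_cons, ih (s + 1),
        List.map_map]
      refine congrArg₂ _ (by ring) (List.map_congr_left (fun y _ => by simp; ring))
    · rw [List.filter_cons_of_neg (by simpa using haw)]
      simp only [pvIdxs, if_neg haw, List.nil_append, ih (s + 1), List.map_map]
      exact List.map_congr_left (fun y _ => by simp; ring)

theorem pvOcc_getD (line : List String) (w : String) :
    ((PySem.List.enumerate line 0).foldl
      (fun (d : PySem.Dict String (List Int)) p => d.modify p.2 [] (· ++ [p.1]))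
      PySem.Dict.empty).getD w [] = pvIdxs line w := by
  have hswap : (PySem.List.enumerate line 0).foldl
      (fun (d : PySem.Dict String (List Int)) p => d.modify p.2 [] (· ++ [p.1])) PySem.Dict.empty
      = (((PySem.List.enumerate line 0).map (fun p => (p.2, p.1))).foldl
          (fun (d : PySem.Dict String (List Int)) p => d.modify p.1 [] (· ++ [p.2])) PySem.Dict.empty) := by
    rw [List.foldl_map]
  rw [hswap, PySem.Dict.getD_foldl_modify_append, PySem.Dict.getD_empty, List.nil_append,
    List.filter_map, List.map_map]
  have : ((PySem.List.enumerate line 0).filter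
      ((fun (p : String × Int) => p.1 == w) ∘ (fun p => (p.2, p.1)))).map
        ((fun (x : String × Int) => x.2) ∘ (fun (p : Int × String) => (p.2, p.1)))
      = ((PySem.List.enumerate line 0).filter (fun p => p.2 == w)).map (·.1) := rfl
  rw [this, pvOccAux line w 0]
  rw [show ((pvIdxs line w).map (· + 0)) = (pvIdxs line w).map id from
    List.map_congr_left (fun y _ => by simp), List.map_id]

theorem pvOcc_items (line : List String) :
    ((PySem.List.enumerate line 0).foldl
      (fun (d : PySem.Dict String (List Int)) p => d.modify p.2 [] (· ++ [p.1]))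
      PySem.Dict.empty).items
    = (PySem.List.dedup line).map (fun w => (w, pvIdxs line w)) := by
  have hkeys : ((PySem.List.enumerate line 0).foldl
      (fun (d : PySem.Dict String (List Int)) p => d.modify p.2 [] (· ++ [p.1]))
      PySem.Dict.empty).keys = PySem.List.dedup line := by
    rw [PySem.Dict.keys_foldl_modify_key (PySem.List.enumerate line 0) (fun p => p.2) []
      (fun _ p => (· ++ [p.1])) PySem.Dict.empty, PySem.Dict.keys_empty,
      PySem.Set.update_nil_left, PySem.List.map_snd_enumerate, PySem.List.dedup_eq_ofList]
  have hnd : ((PySem.List.enumerate line 0).foldl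
      (fun (d : PySem.Dict String (List Int)) p => d.modify p.2 [] (· ++ [p.1]))
      PySem.Dict.empty).keys.Nodup := by
    refine PySem.Dict.nodup_keys_foldl_modify_key (PySem.List.enumerate line 0) (fun p => p.2) []
      (fun _ p => (· ++ [p.1])) PySem.Dict.empty ?_
    rw [PySem.Dict.keys_empty]; exact List.nodup_nil
  rw [PySem.Dict.items_eq_map_keys _ hnd [], hkeys]
  exact List.map_congr_left (fun w _ => by rw [pvOcc_getD])

theorem pvSeenFold (xs : List String) (best : PySem.Dict String Int) (seen : PySem.Set String)
    (ed : String → String → Int) (pf : String → String) :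
    (xs.foldl
      (fun (st : PySem.Dict String Int × PySem.Set String) w2 =>
        if PySem.Set.contains st.2 w2 then st
        else
          if st.1.contains (pf w2) = false then
            (st.1.insert (pf w2) (ed (pf w2) w2), PySem.Set.add st.2 w2)
          else if ed (pf w2) w2 < st.1.getD (pf w2) 0 then
            (st.1.insert (pf w2) (ed (pf w2) w2), PySem.Set.add st.2 w2)
          else (st.1, PySem.Set.add st.2 w2))
      (best, seen)).1
    = ((PySem.Set.ofList xs).filter (fun w => !(PySem.Set.contains seen w))).foldl
        (fun b w2 => pvStepB b (pf w2, ed (pf w2) w2)) best := by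
  induction xs generalizing best seen with
  | nil => rfl
  | cons w xs ih =>
    rw [List.foldl_cons]
    by_cases hw : PySem.Set.contains seen w
    · have hmem : w ∈ seen := (PySem.Set.contains_iff seen w).mp hw
      rw [if_pos hw, ih best seen, PySem.Set.ofList_cons,
        List.filter_cons_of_neg (by simp [hmem])]
      unfold PySem.Set.discard
      rw [List.filter_filter]
      refine congrArg _ (List.filter_congr (fun y _ => ?_))
      by_cases hyw : y = w
      · subst hyw
        simp [hmem]
      · simp [hyw]
    · rw [if_neg hw]
      have hstep : (if best.contains (pf w) = false then
            (best.insert (pf w) (ed (pf w) w), PySem.Set.add seen w)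
          else if ed (pf w) w < best.getD (pf w) 0 then
            (best.insert (pf w) (ed (pf w) w), PySem.Set.add seen w)
          else (best, PySem.Set.add seen w))
          = (pvStepB best (pf w, ed (pf w) w), PySem.Set.add seen w) := by
        unfold pvStepB; split_ifs <;> rfl
      have hmem : w ∉ seen := fun h => hw ((PySem.Set.contains_iff seen w).mpr h)
      rw [hstep, ih _ _, PySem.Set.ofList_cons, List.filter_cons_of_pos (by simp [hmem]),
        List.foldl_cons]
      refine congrArg _ (?_ : List.filter _ _ = List.filter _ _)
      unfold PySem.Set.discard
      rw [List.filter_filter]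
      refine List.filter_congr (fun y _ => ?_)
      by_cases hyw : y = w
      · subst hyw
        have h2 : PySem.Set.contains (PySem.Set.add seen y) y = true :=
          (PySem.Set.contains_iff _ _).mpr ((PySem.Set.mem_add _ _ _).mpr (Or.inr rfl))
        simp
      · have hca : PySem.Set.contains (PySem.Set.add seen w) y = PySem.Set.contains seen y := by
          by_cases hcy : y ∈ seen
          · rw [(PySem.Set.contains_iff seen y).mpr hcy,
              (PySem.Set.contains_iff (PySem.Set.add seen w) y).mpr
                ((PySem.Set.mem_add _ _ _).mpr (Or.inl hcy))]
          · have h1 : PySem.Set.contains seen y = false := by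
              rw [Bool.eq_false_iff]
              exact fun h => hcy ((PySem.Set.contains_iff seen y).mp h)
            have h2 : PySem.Set.contains (PySem.Set.add seen w) y = false := by
              rw [Bool.eq_false_iff]
              intro h
              rcases (PySem.Set.mem_add seen w y).mp ((PySem.Set.contains_iff _ _).mp h) with h' | h'
              · exact hcy h'
              · exact hyw h'
            rw [h1, h2]
        simp [hyw]

theorem pvGroups_eq_flat (l : List String) :
    pvGroups l = (PySem.List.dedup l).flatMap (fun w1 =>
      (PySem.List.dedup (l.drop (l.idxOf w1 + 1))).map (fun w2 =>
        (pvPat w1 w2, (pvMinDist (pvIdxs l w1) (pvIdxs l w2)).getD 0))) := by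
  unfold pvGroups pvGroupPairs
  rw [List.map_flatMap]
  simp [List.map_map, Function.comp_def]

theorem pvB_inner (line : List String) (w1 : String) (hw1 : w1 ∈ line)
    (best : PySem.Dict String Int) :
    ((PySem.List.pyRange ((PySem.List.pyGetD (pvIdxs line w1) 0 0) + 1) (line.length : Int) 1).foldl
      (fun (st : PySem.Dict String Int × PySem.Set String) p2 =>
        if PySem.Set.contains st.2 (PySem.List.pyGetD line p2 "") then st
        else
          if st.1.contains (w1 ++ " " ++ PySem.List.pyGetD line p2 "") = false then
            (st.1.insert (w1 ++ " " ++ PySem.List.pyGetD line p2 "")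
              ((pvMinDist (pvIdxs line w1) (pvIdxs line (PySem.List.pyGetD line p2 ""))).getD 0),
             PySem.Set.add st.2 (PySem.List.pyGetD line p2 ""))
          else if ((pvMinDist (pvIdxs line w1) (pvIdxs line (PySem.List.pyGetD line p2 ""))).getD 0)
              < st.1.getD (w1 ++ " " ++ PySem.List.pyGetD line p2 "") 0 then
            (st.1.insert (w1 ++ " " ++ PySem.List.pyGetD line p2 "")
              ((pvMinDist (pvIdxs line w1) (pvIdxs line (PySem.List.pyGetD line p2 ""))).getD 0),
             PySem.Set.add st.2 (PySem.List.pyGetD line p2 ""))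
          else (st.1, PySem.Set.add st.2 (PySem.List.pyGetD line p2 "")))
      (best, PySem.Set.empty)).1
    = ((PySem.List.dedup (line.drop (line.idxOf w1 + 1))).map
        (fun w2 => (pvPat w1 w2, (pvMinDist (pvIdxs line w1) (pvIdxs line w2)).getD 0))).foldl
        pvStepB best := by
  rw [pvIdxs_head line w1 hw1]
  have h := PySem.List.foldl_pyRange_pyGetD' line ""
    (fun (st : PySem.Dict String Int × PySem.Set String) w2 =>
        if PySem.Set.contains st.2 w2 then st
        else
          if st.1.contains (w1 ++ " " ++ w2) = false then
            (st.1.insert (w1 ++ " " ++ w2)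
              ((pvMinDist (pvIdxs line w1) (pvIdxs line w2)).getD 0), PySem.Set.add st.2 w2)
          else if ((pvMinDist (pvIdxs line w1) (pvIdxs line w2)).getD 0)
              < st.1.getD (w1 ++ " " ++ w2) 0 then
            (st.1.insert (w1 ++ " " ++ w2)
              ((pvMinDist (pvIdxs line w1) (pvIdxs line w2)).getD 0), PySem.Set.add st.2 w2)
          else (st.1, PySem.Set.add st.2 w2))
    (best, PySem.Set.empty) (a := (line.idxOf w1 : Int) + 1) (by positivity)
  simp only [] at h
  rw [h, show (((line.idxOf w1 : Int) + 1).toNat) = line.idxOf w1 + 1 from by omega]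
  have h2 := pvSeenFold (line.drop (line.idxOf w1 + 1)) best PySem.Set.empty
    (fun _ w2 => (pvMinDist (pvIdxs line w1) (pvIdxs line w2)).getD 0)
    (fun w2 => w1 ++ " " ++ w2)
  simp only [] at h2
  rw [h2]
  have h3 : (PySem.Set.ofList (line.drop (line.idxOf w1 + 1))).filter
      (fun w => !(PySem.Set.contains PySem.Set.empty w))
      = PySem.List.dedup (line.drop (line.idxOf w1 + 1)) := by
    rw [PySem.List.dedup_eq_ofList]
    refine List.filter_eq_self.mpr (fun a _ => rfl)
  rw [h3, List.foldl_map]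
  rfl

theorem pvB_line (line : List String) :
    pvLineColloc line
    = (((pvGroups line).foldl pvStepB PySem.Dict.empty).items).map
        (fun pv => pv.1 ++ "<COUNT>" ++ PySem.Int.toStr pv.2) := by
  unfold pvLineColloc
  simp only [pvOcc_getD, pvOcc_items]
  rw [List.foldl_map]
  refine congrArg (fun (d : PySem.Dict String Int) =>
    d.items.map (fun pv => pv.1 ++ "<COUNT>" ++ PySem.Int.toStr pv.2)) ?_
  rw [pvGroups_eq_flat, pvFoldlFlatMap]
  exact PySem.List.foldl_congr_mem _ _ _ _
    (fun best w1 hw1 => pvB_inner line w1 ((PySem.List.mem_dedup line w1).mp hw1) best)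

theorem pvB_map (content : List (List String)) :
    buildCollocContext_alt content = content.map pvLineColloc := by
  unfold buildCollocContext_alt
  rw [PySem.List.foldl_append_singleton_eq_map, List.nil_append]

-- ---------- the two-pointer minimum ----------

theorem pvAdvance_spec (rem : List Int) (last : Option Int) (q : Int) :
    pvAdvance rem last q = (rem.dropWhile (· < q), ((rem.takeWhile (· < q)).getLast?).or last) := by
  induction rem generalizing last with
  | nil => rfl
  | cons p rest ih =>
    by_cases hp : p < q
    · rw [pvAdvance, if_pos hp, ih, List.dropWhile_cons_of_pos (by simpa using hp),
        List.takeWhile_cons_of_pos (by simpa using hp), ← List.singleton_append,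
        List.getLast?_append]
      cases (rest.takeWhile (· < q)).getLast? <;> rfl
    · rw [pvAdvance, if_neg hp, List.dropWhile_cons_of_neg (by simpa using hp),
        List.takeWhile_cons_of_neg (by simpa using hp)]
      rfl

theorem pvTakeWhile_sorted (rem : List Int) (q : Int) (h : rem.Pairwise (· < ·)) :
    rem.takeWhile (· < q) = rem.filter (· < q) := by
  induction rem with
  | nil => rfl
  | cons p rest ih =>
    by_cases hp : p < q
    · rw [List.takeWhile_cons_of_pos (by simpa using hp), List.filter_cons_of_pos (by simpa using hp),
        ih (List.pairwise_cons.mp h).2]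
    · rw [List.takeWhile_cons_of_neg (by simpa using hp), List.filter_cons_of_neg (by simpa using hp)]
      symm
      rw [List.filter_eq_nil_iff]
      intro x hx
      have := (List.pairwise_cons.mp h).1 x hx
      simpa using by omega

theorem pvGoInv (ps1 : List Int) (fut : List Int) :
    ∀ (best : Option Int) (pre rem : List Int),
    pre ++ rem = ps1 →
    ps1.Pairwise (· < ·) → fut.Pairwise (· < ·) →
    (∀ x ∈ pre, ∀ q ∈ fut, x < q) →
    (fut.foldl
      (fun (st : Option Int × List Int × Option Int) p2 =>
        let rl := pvAdvance st.2.1 st.2.2 p2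
        match rl.2 with
        | none => (st.1, rl)
        | some l =>
          let d := p2 - l
          match st.1 with
          | none => (some d, rl)
          | some b => if d < b then (some d, rl) else (st.1, rl))
      (best, rem, pre.getLast?)).1
    = fut.foldl (fun b q =>
        match pvPred ps1 q with
        | none => b
        | some l => match b with
          | none => some (q - l)
          | some x => some (min x (q - l))) best := by
  induction fut with
  | nil => intro best pre rem _ _ _ _; rfl
  | cons q fut ih =>
    intro best pre rem hsplit hps1 hfut hcross
    have hprerem : (pre ++ rem).Pairwise (· < ·) := by rw [hsplit]; exact hps1
    have hremsorted : rem.Pairwise (· < ·) :=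
      (List.pairwise_append.mp hprerem).2.1
    have hpreq : ∀ x ∈ pre, x < q := fun x hx => hcross x hx q List.mem_cons_self
    have hpred : pvPred ps1 q = ((rem.filter (· < q)).getLast?).or pre.getLast? := by
      unfold pvPred
      rw [← hsplit, List.filter_append,
        List.filter_eq_self.mpr (fun x hx => by simpa using hpreq x hx), List.getLast?_append]
    have hlast : (pre ++ rem.filter (· < q)).getLast?
        = ((rem.filter (· < q)).getLast?).or pre.getLast? := List.getLast?_append
    have hsplit' : (pre ++ rem.filter (· < q)) ++ rem.dropWhile (· < q) = ps1 := by
      rw [List.append_assoc, ← pvTakeWhile_sorted rem q hremsorted,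
        List.takeWhile_append_dropWhile, hsplit]
    have hfut' : fut.Pairwise (· < ·) := (List.pairwise_cons.mp hfut).2
    have hqfut : ∀ q' ∈ fut, q < q' := (List.pairwise_cons.mp hfut).1
    have hcross' : ∀ x ∈ pre ++ rem.filter (· < q), ∀ q' ∈ fut, x < q' := by
      intro x hx q' hq'
      rcases List.mem_append.mp hx with hx | hx
      · exact hcross x hx q' (List.mem_cons_of_mem _ hq')
      · have hxq : x < q := by simpa using List.of_mem_filter hx
        exact lt_trans hxq (hqfut q' hq')
    have happly : ∀ best' : Option Int,
        (fut.foldl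
          (fun (st : Option Int × List Int × Option Int) p2 =>
            let rl := pvAdvance st.2.1 st.2.2 p2
            match rl.2 with
            | none => (st.1, rl)
            | some l =>
              let d := p2 - l
              match st.1 with
              | none => (some d, rl)
              | some b => if d < b then (some d, rl) else (st.1, rl))
          (best', rem.dropWhile (· < q), ((rem.filter (· < q)).getLast?).or pre.getLast?)).1
        = fut.foldl (fun b q =>
            match pvPred ps1 q with
            | none => b
            | some l => match b with
              | none => some (q - l)
              | some x => some (min x (q - l))) best' := by
      intro best'
      rw [← hlast]
      exact ih best' (pre ++ rem.filter (· < q)) (rem.dropWhile (· < q)) hsplit' hps1 hfut' hcross'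
    have hred : ∀ (o : Option Int) (B : Option Int) (L : List Int),
        (match o with
         | none => (B, L, o)
         | some l =>
           match B with
           | none => (some (q - l), L, o)
           | some b => if q - l < b then (some (q - l), L, o) else (B, L, o))
        = ((match o with
            | none => B
            | some l =>
              match B with
              | none => some (q - l)
              | some b => if q - l < b then some (q - l) else B), L, o) := by
      intro o B L
      cases o with
      | none => rfl
      | some l =>
        cases B with
        | none => rfl
        | some b =>
          show (if q - l < b then (some (q - l), L, some l) else (some b, L, some l))
              = ((if q - l < b then some (q - l) else some b), L, some l)
          split_ifs <;> rfl
    rw [List.foldl_cons, List.foldl_cons]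
    simp only []
    rw [pvAdvance_spec rem pre.getLast? q, pvTakeWhile_sorted rem q hremsorted, hpred]
    simp only []
    rw [hred (((rem.filter (· < q)).getLast?).or pre.getLast?) best (rem.dropWhile (· < q)),
      happly _]
    refine congrArg (fun i => List.foldl _ i fut) ?_
    rcases ((rem.filter (· < q)).getLast?).or pre.getLast? with _ | l
    · rfl
    · cases best with
      | none => rfl
      | some b =>
        show (if q - l < b then some (q - l) else some b) = some (min b (q - l))
        split_ifs with hd <;> exact congrArg some (by omega)

theorem pvMinDist_eq (ps1 ps2 : List Int) (h1 : ps1.Pairwise (· < ·)) (h2 : ps2.Pairwise (· < ·)) :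
    pvMinDist ps1 ps2 = pvOMin none (pvCand ps1 ps2) := by
  unfold pvMinDist
  have hgo := pvGoInv ps1 ps2 none [] ps1 rfl h1 h2 (by intro x hx; cases hx)
  rw [show (([] : List Int).getLast?) = none from rfl] at hgo
  rw [hgo]
  unfold pvCand pvOMin
  rw [List.foldl_filterMap]
  refine PySem.List.foldl_congr_mem _ _ _ _ (fun b q _ => ?_)
  rcases hp : pvPred ps1 q with _ | l
  · simp
  · cases b <;> simp

-- ---------- pvOMin ----------

theorem pvOMin_some (x : Int) (vs : List Int) : pvOMin (some x) vs = some (vs.foldl min x) := by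
  induction vs generalizing x with
  | nil => rfl
  | cons v vs ih => simp only [pvOMin, List.foldl_cons] at *; exact ih (min x v)

theorem pvOMin_min (vs : List Int) (hvs : vs ≠ []) :
    ∃ m, pvOMin none vs = some m ∧ m ∈ vs ∧ ∀ v ∈ vs, m ≤ v := by
  cases vs with
  | nil => exact absurd rfl hvs
  | cons v t =>
    refine ⟨t.foldl min v, ?_, ?_, ?_⟩
    · have h := pvOMin_some v t
      simp only [pvOMin, List.foldl_cons] at *
      exact h
    · rcases PySem.List.foldl_min_mem t v with h | h
      · rw [h]; exact List.mem_cons_self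
      · exact List.mem_cons_of_mem _ h
    · intro x hx
      rcases List.mem_cons.mp hx with rfl | hx
      · exact (PySem.List.foldl_min_le t x).1
      · exact (PySem.List.foldl_min_le t v).2 x hx

-- ---------- the order: B's groups are A's first occurrences ----------
theorem pvMem_pairsW (l : List String) (wp : String × String) (g : Int) :
    (wp, g) ∈ pvPairsW l ↔
      ∃ i j : Nat, ∃ hi : i < l.length, ∃ hj : j < l.length, i < j ∧ l[i] = wp.1 ∧ l[j] = wp.2 ∧ g = (j : Int) - i := by
  obtain ⟨w1, w2⟩ := wp
  induction l generalizing g with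
  | nil => simp [pvPairsW]
  | cons a t ih =>
    constructor
    · intro h
      rcases List.mem_append.mp h with h | h
      · rcases List.mem_map.mp h with ⟨p, hp, hpe⟩
        rcases (PySem.List.mem_enumerate_iff _ _ _).mp hp with ⟨k, hk, rfl⟩
        simp only [Prod.mk.injEq] at hpe
        obtain ⟨⟨ha, hb⟩, hg⟩ := hpe
        refine ⟨0, k + 1, by simp, by simpa using Nat.succ_lt_succ hk, by omega, ?_, ?_, ?_⟩
        · simpa using ha
        · simpa using hb
        · rw [← hg]; push_cast; ring
      · rcases (ih g).mp h with ⟨i, j, hi, hj, hij, h1, h2, hg⟩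
        refine ⟨i + 1, j + 1, by simpa using Nat.succ_lt_succ hi,
          by simpa using Nat.succ_lt_succ hj, by omega, by simpa using h1, by simpa using h2, ?_⟩
        rw [hg]; push_cast; ring
    · rintro ⟨i, j, hi, hj, hij, h1, h2, rfl⟩
      cases i with
      | zero =>
        cases j with
        | zero => omega
        | succ k =>
          refine List.mem_append.mpr (Or.inl (List.mem_map.mpr
            ⟨((1 : Int) + (k : Int), t[k]'(by simpa using hj)), ?_, ?_⟩))
          · exact (PySem.List.mem_enumerate_iff _ _ _).mpr ⟨k, by simpa using hj, rfl⟩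
          · simp only [Prod.mk.injEq]
            refine ⟨⟨by simpa using h1, by simpa using h2⟩, by push_cast; ring⟩
      | succ i =>
        cases j with
        | zero => omega
        | succ j =>
          refine List.mem_append.mpr (Or.inr ((ih _).mpr
            ⟨i, j, by simpa using hi, by simpa using hj, by omega,
              by simpa using h1, by simpa using h2, by push_cast; ring⟩))

theorem pvPairsW_pos (l : List String) : ∀ p ∈ pvPairsW l, 0 < p.2 := by
  intro p hp
  rcases (pvMem_pairsW l p.1 p.2).mp (by simpa using hp) with ⟨i, j, hi, hj, hij, _, _, h⟩
  omega

theorem pvWPairs_mem (l : List String) : ∀ p ∈ pvWPairs l, p.1 ∈ l ∧ p.2 ∈ l := by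
  intro p hp
  rcases List.mem_map.mp hp with ⟨q, hq, rfl⟩
  rcases (pvMem_pairsW l q.1 q.2).mp (by simpa using hq) with ⟨i, j, hi, hj, hij, h1, h2, _⟩
  exact ⟨h1 ▸ List.getElem_mem hi, h2 ▸ List.getElem_mem hj⟩


theorem pvDedupMapInj {α β : Type} [BEq α] [LawfulBEq α] [BEq β] [LawfulBEq β]
    {f : α → β} (hf : Function.Injective f) (l : List α) :
    PySem.Set.ofList (l.map f) = (PySem.Set.ofList l).map f := by
  induction l with
  | nil => rfl
  | cons x xs ih =>
    rw [List.map_cons, PySem.Set.ofList_cons, PySem.Set.ofList_cons, ih, List.map_cons]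
    refine congrArg _ ?_
    unfold PySem.Set.discard
    rw [List.filter_map]
    refine congrArg _ (List.filter_congr (fun y _ => ?_))
    by_cases hyx : y = x
    · subst hyx; simp
    · simp [hyx, hf.ne hyx]

theorem pvOfListMapOfList {α β : Type} [BEq α] [LawfulBEq α] [BEq β] [LawfulBEq β]
    (f : α → β) (l : List α) :
    PySem.Set.ofList (l.map f) = PySem.Set.ofList ((PySem.Set.ofList l).map f) := by
  induction l using List.reverseRecOn with
  | nil => rfl
  | append_singleton xs x ih =>
    rw [List.map_append, List.map_singleton, PySem.Set.ofList_append_singleton,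
      PySem.Set.ofList_append_singleton, ih]
    by_cases hx : x ∈ PySem.Set.ofList xs
    · rw [PySem.Set.add_of_mem hx]
      have hfx : f x ∈ PySem.Set.ofList ((PySem.Set.ofList xs).map f) :=
        (PySem.Set.mem_ofList _ _).mpr (List.mem_map_of_mem hx)
      rw [PySem.Set.add_of_mem hfx]
    · rw [PySem.Set.add_of_not_mem hx, List.map_append, List.map_singleton,
        PySem.Set.ofList_append_singleton]

theorem pvWPairs_cons (w : String) (t : List String) :
    pvWPairs (w :: t) = t.map (fun y => (w, y)) ++ pvWPairs t := by
  unfold pvWPairs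
  rw [show pvPairsW (w :: t) = (PySem.List.enumerate t 1).map (fun p => ((w, p.2), p.1)) ++ pvPairsW t from rfl,
    List.map_append, List.map_map]
  refine congrArg₂ _ ?_ rfl
  have : (PySem.List.enumerate t 1).map ((fun (q : (String × String) × Int) => q.1) ∘ (fun p => ((w, p.2), p.1)))
      = (PySem.List.enumerate t 1).map ((fun y => (w, y)) ∘ (fun (p : Int × String) => p.2)) := rfl
  rw [this, ← List.map_map, PySem.List.map_snd_enumerate]

theorem pvGroupPairs_eq_dedup (l : List String) :
    pvGroupPairs l = PySem.List.dedup (pvWPairs l) := by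
  induction l with
  | nil => rfl
  | cons w t ih =>
    rw [pvWPairs_cons, PySem.List.dedup_eq_ofList, PySem.Set.ofList_append,
      PySem.Set.update_eq_append_filter]
    have hinj : Function.Injective (fun y => (w, y) : String → String × String) :=
      fun a b h => congrArg Prod.snd h
    rw [pvDedupMapInj hinj t]
    -- rewrite the filter predicate to fst ≠ w on members
    have hfil : ((PySem.Set.ofList (pvWPairs t)).filter
        (fun y => !(PySem.Set.contains ((PySem.Set.ofList t).map (fun y => (w, y))) y)))
        = ((PySem.Set.ofList (pvWPairs t)).filter (fun q => !(q.1 == w))) := by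
      refine List.filter_congr (fun q hq => ?_)
      have hq2 : q.2 ∈ t :=
        (pvWPairs_mem t q ((PySem.Set.mem_ofList _ _).mp hq)).2
      by_cases hqw : q.1 = w
      · have hmm : q ∈ (PySem.Set.ofList t).map (fun y => (w, y)) :=
          List.mem_map.mpr ⟨q.2, (PySem.Set.mem_ofList _ _).mpr hq2,
            Prod.ext (by rw [hqw]) rfl⟩
        have hc : PySem.Set.contains ((PySem.Set.ofList t).map (fun y => (w, y))) q = true :=
          (PySem.Set.contains_iff _ _).mpr hmm
        rw [hc]
        simp [hqw]
      · have hnc : PySem.Set.contains ((PySem.Set.ofList t).map (fun y => (w, y))) q = false := by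
          rw [Bool.eq_false_iff]
          intro hc
          rcases List.mem_map.mp ((PySem.Set.contains_iff _ _).mp hc) with ⟨y, _, hy⟩
          exact hqw (by rw [← hy])
        rw [hnc]
        simp [hqw]
    rw [hfil, ← PySem.List.dedup_eq_ofList (pvWPairs t), ← ih]
    -- now compute the LHS
    unfold pvGroupPairs
    rw [show PySem.List.dedup (w :: t) = PySem.Set.ofList (w :: t) from PySem.List.dedup_eq_ofList _,
      PySem.Set.ofList_cons, List.flatMap_cons]
    refine congrArg₂ _ ?_ ?_
    · rw [List.idxOf_cons_self]
      norm_num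
    · -- tail groups
      unfold PySem.Set.discard
      have hstep : ∀ (S : List String),
          (S.filter (fun y => !(y == w))).flatMap (fun w1 =>
            (PySem.List.dedup ((w :: t).drop ((w :: t).idxOf w1 + 1))).map (fun w2 => (w1, w2)))
          = S.flatMap (fun w1 =>
              ((PySem.List.dedup (t.drop (t.idxOf w1 + 1))).map (fun w2 => (w1, w2))).filter
                (fun q => !(q.1 == w))) := by
        intro S
        induction S with
        | nil => rfl
        | cons y S ihS =>
          by_cases hyw : y = w
          · rw [List.filter_cons_of_neg (by simp [hyw]), ihS, List.flatMap_cons]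
            have hnil : ((PySem.List.dedup (t.drop (t.idxOf y + 1))).map (fun w2 => (y, w2))).filter
                (fun q => !(q.1 == w)) = [] := by
              rw [List.filter_eq_nil_iff]
              intro q hq
              rcases List.mem_map.mp hq with ⟨w2, _, rfl⟩
              simp [hyw]
            rw [hnil, List.nil_append]
          · rw [List.filter_cons_of_pos (by simp [hyw]), List.flatMap_cons, List.flatMap_cons, ihS]
            refine congrArg₂ _ ?_ rfl
            have hidx : (w :: t).idxOf y + 1 = (t.idxOf y + 1) + 1 := by
              rw [List.idxOf_cons_ne _ (fun h => hyw h.symm)]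
            rw [hidx, List.drop_succ_cons]
            have hall : ∀ q ∈ (PySem.List.dedup (t.drop (t.idxOf y + 1))).map (fun w2 => (y, w2)),
                (!(q.1 == w)) = true := by
              intro q hq
              rcases List.mem_map.mp hq with ⟨w2, _, rfl⟩
              simp [hyw]
            rw [List.filter_eq_self.mpr hall]
      have h5 := hstep (PySem.Set.ofList t)
      rw [h5, PySem.List.dedup_eq_ofList t, List.filter_flatMap]


-- ---------- values agree per key ----------

theorem pvSortedLast (l : List Int) (y x : Int) (h : l.Pairwise (· < ·)) (hy : l.getLast? = some y)
    (hx : x ∈ l) : x ≤ y := by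
  induction l with
  | nil => cases hx
  | cons a t ih =>
    cases t with
    | nil =>
      simp at hy hx; omega
    | cons b t' =>
      rw [List.getLast?_cons_cons] at hy
      rcases List.mem_cons.mp hx with rfl | hx
      · have hy' : y ∈ b :: t' := List.mem_of_getLast? hy
        have := (List.pairwise_cons.mp h).1 y hy'
        omega
      · exact ih (List.pairwise_cons.mp h).2 hy hx

theorem pvMinDist_gaps (l : List String) (w1 w2 : String) :
    (pvMinDist (pvIdxs l w1) (pvIdxs l w2) = none ∧ ∀ g, ((w1, w2), g) ∉ pvPairsW l) ∨
    (∃ m, pvMinDist (pvIdxs l w1) (pvIdxs l w2) = some m ∧ ((w1, w2), m) ∈ pvPairsW l ∧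
      ∀ g, ((w1, w2), g) ∈ pvPairsW l → m ≤ g) := by
  have h1 := pvIdxs_sorted l w1
  have h2 := pvIdxs_sorted l w2
  rw [pvMinDist_eq _ _ h1 h2]
  by_cases hcand : pvCand (pvIdxs l w1) (pvIdxs l w2) = []
  · left
    refine ⟨by rw [hcand]; rfl, ?_⟩
    intro g hg
    rcases (pvMem_pairsW l (w1, w2) g).mp hg with ⟨i, j, hi, hj, hij, hw1i, hw2j, rfl⟩
    have hjmem : ((j : Nat) : Int) ∈ pvIdxs l w2 := (pvIdxs_spec l w2 _).mpr ⟨j, hj, hw2j, rfl⟩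
    have himem : ((i : Nat) : Int) ∈ pvIdxs l w1 := (pvIdxs_spec l w1 _).mpr ⟨i, hi, hw1i, rfl⟩
    have hfil : ((i : Nat) : Int) ∈ (pvIdxs l w1).filter (· < ((j : Nat) : Int)) :=
      List.mem_filter.mpr ⟨himem, by simpa using (by exact_mod_cast hij : ((i:Nat):Int) < ((j:Nat):Int))⟩
    obtain ⟨l0, hl0⟩ := Option.isSome_iff_exists.mp
      (List.getLast?_isSome.mpr (List.ne_nil_of_mem hfil))
    have : (((j : Nat) : Int) - l0) ∈ pvCand (pvIdxs l w1) (pvIdxs l w2) := by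
      unfold pvCand
      refine List.mem_filterMap.mpr ⟨((j : Nat) : Int), hjmem, ?_⟩
      unfold pvPred
      rw [hl0]
      rfl
    rw [hcand] at this
    cases this
  · right
    rcases pvOMin_min _ hcand with ⟨m, hout, hmem, hmin⟩
    refine ⟨m, hout, ?_, ?_⟩
    · unfold pvCand at hmem
      rcases List.mem_filterMap.mp hmem with ⟨qj, hqj, hmap⟩
      rcases Option.map_eq_some_iff.mp hmap with ⟨l0, hpred, rfl⟩
      unfold pvPred at hpred
      have hl0mem : l0 ∈ (pvIdxs l w1).filter (· < qj) := List.mem_of_getLast? hpred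
      have hl0w1 : l0 ∈ pvIdxs l w1 := (List.mem_filter.mp hl0mem).1
      have hl0lt : l0 < qj := by simpa using (List.mem_filter.mp hl0mem).2
      rcases (pvIdxs_spec l w1 l0).mp hl0w1 with ⟨i, hi, hw1i, rfl⟩
      rcases (pvIdxs_spec l w2 qj).mp hqj with ⟨j, hj, hw2j, rfl⟩
      exact (pvMem_pairsW l (w1, w2) _).mpr
        ⟨i, j, hi, hj, by exact_mod_cast hl0lt, hw1i, hw2j, rfl⟩
    · intro g hg
      rcases (pvMem_pairsW l (w1, w2) g).mp hg with ⟨i, j, hi, hj, hij, hw1i, hw2j, rfl⟩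
      have hjmem : ((j : Nat) : Int) ∈ pvIdxs l w2 := (pvIdxs_spec l w2 _).mpr ⟨j, hj, hw2j, rfl⟩
      have himem : ((i : Nat) : Int) ∈ pvIdxs l w1 := (pvIdxs_spec l w1 _).mpr ⟨i, hi, hw1i, rfl⟩
      have hfil : ((i : Nat) : Int) ∈ (pvIdxs l w1).filter (· < ((j : Nat) : Int)) :=
        List.mem_filter.mpr ⟨himem, by simpa using (by exact_mod_cast hij : ((i:Nat):Int) < ((j:Nat):Int))⟩
      obtain ⟨l0, hl0⟩ := Option.isSome_iff_exists.mp
        (List.getLast?_isSome.mpr (List.ne_nil_of_mem hfil))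
      have hl0ge : ((i : Nat) : Int) ≤ l0 :=
        pvSortedLast _ l0 _ (h1.filter _) hl0 hfil
      have hcmem : (((j : Nat) : Int) - l0) ∈ pvCand (pvIdxs l w1) (pvIdxs l w2) := by
        unfold pvCand
        refine List.mem_filterMap.mpr ⟨((j : Nat) : Int), hjmem, ?_⟩
        unfold pvPred
        rw [hl0]
        rfl
      have := hmin _ hcmem
      omega

theorem pvGroups_pos (l : List String) : ∀ p ∈ pvGroups l, 0 < p.2 := by
  intro p hp
  unfold pvGroups at hp
  rcases List.mem_map.mp hp with ⟨wp, hwp, rfl⟩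
  have hwp' : wp ∈ pvWPairs l := by
    rw [pvGroupPairs_eq_dedup] at hwp
    exact (PySem.List.mem_dedup _ _).mp hwp
  rcases List.mem_map.mp hwp' with ⟨q, hq, hfst⟩
  have hpair : ((wp.1, wp.2), q.2) ∈ pvPairsW l := by
    rw [← hfst]
    simpa using hq
  rcases pvMinDist_gaps l wp.1 wp.2 with ⟨_, hno⟩ | ⟨m, hsome, hmemv, _⟩
  · exact absurd hpair (hno q.2)
  · simp only [hsome, Option.getD_some]
    exact pvPairsW_pos l _ hmemv

theorem pvVals_agree (l : List String) (k : String) :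
    pvOMin none (((pvLA l).filter (fun p => p.1 == k)).map (·.2))
      = pvOMin none (((pvGroups l).filter (fun p => p.1 == k)).map (·.2)) := by
  have hA : ∀ v : Int, (v ∈ ((pvLA l).filter (fun p => p.1 == k)).map (·.2)) ↔
      ∃ wp : String × String, ∃ g, (wp, g) ∈ pvPairsW l ∧ pvPat wp.1 wp.2 = k ∧ v = g := by
    intro v
    constructor
    · intro hv
      rcases List.mem_map.mp hv with ⟨p, hpf, rfl⟩
      have hpl := (List.mem_filter.mp hpf).1
      have hpk : p.1 = k := by simpa using (List.mem_filter.mp hpf).2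
      unfold pvLA at hpl
      rcases List.mem_map.mp hpl with ⟨q, hq, rfl⟩
      exact ⟨q.1, q.2, by simpa using hq, by simpa using hpk, rfl⟩
    · rintro ⟨wp, g, hmem, hpk, rfl⟩
      refine List.mem_map.mpr ⟨(pvPat wp.1 wp.2, v),
        List.mem_filter.mpr ⟨?_, by simp [hpk]⟩, rfl⟩
      unfold pvLA
      exact List.mem_map.mpr ⟨(wp, v), hmem, rfl⟩
  have hB : ∀ v : Int, (v ∈ ((pvGroups l).filter (fun p => p.1 == k)).map (·.2)) ↔
      ∃ wp : String × String, wp ∈ pvGroupPairs l ∧ pvPat wp.1 wp.2 = k ∧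
        v = (pvMinDist (pvIdxs l wp.1) (pvIdxs l wp.2)).getD 0 := by
    intro v
    constructor
    · intro hv
      rcases List.mem_map.mp hv with ⟨p, hpf, rfl⟩
      have hpl := (List.mem_filter.mp hpf).1
      have hpk : p.1 = k := by simpa using (List.mem_filter.mp hpf).2
      unfold pvGroups at hpl
      rcases List.mem_map.mp hpl with ⟨wp, hwp, rfl⟩
      exact ⟨wp, hwp, by simpa using hpk, rfl⟩
    · rintro ⟨wp, hwp, hpk, rfl⟩
      refine List.mem_map.mpr ⟨(pvPat wp.1 wp.2, (pvMinDist (pvIdxs l wp.1) (pvIdxs l wp.2)).getD 0),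
        List.mem_filter.mpr ⟨?_, by simp [hpk]⟩, rfl⟩
      unfold pvGroups
      exact List.mem_map.mpr ⟨wp, hwp, rfl⟩
  have hWP : ∀ wp : String × String, wp ∈ pvGroupPairs l ↔ ∃ g, (wp, g) ∈ pvPairsW l := by
    intro wp
    rw [pvGroupPairs_eq_dedup, PySem.List.mem_dedup]
    constructor
    · intro h
      rcases List.mem_map.mp h with ⟨q, hq, rfl⟩
      exact ⟨q.2, by simpa using hq⟩
    · rintro ⟨g, hg⟩
      exact List.mem_map.mpr ⟨(wp, g), hg, rfl⟩
  by_cases hAe : ((pvLA l).filter (fun p => p.1 == k)).map (·.2) = []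
  · have hBe : ((pvGroups l).filter (fun p => p.1 == k)).map (·.2) = [] := by
      rw [List.eq_nil_iff_forall_not_mem]
      intro v hv
      rcases (hB v).mp hv with ⟨wp, hwp, hpk, rfl⟩
      rcases (hWP wp).mp hwp with ⟨g, hg⟩
      have : g ∈ ((pvLA l).filter (fun p => p.1 == k)).map (·.2) :=
        (hA g).mpr ⟨wp, g, hg, hpk, rfl⟩
      rw [hAe] at this
      cases this
    rw [hAe, hBe]
  · obtain ⟨m, hAm, hAmem, hAmin⟩ := pvOMin_min _ hAe
    have hBne : ((pvGroups l).filter (fun p => p.1 == k)).map (·.2) ≠ [] := by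
      rcases (hA m).mp hAmem with ⟨wp, g, hg, hpk, rfl⟩
      intro hBe
      have : (pvMinDist (pvIdxs l wp.1) (pvIdxs l wp.2)).getD 0
          ∈ ((pvGroups l).filter (fun p => p.1 == k)).map (·.2) :=
        (hB _).mpr ⟨wp, (hWP wp).mpr ⟨m, hg⟩, hpk, rfl⟩
      rw [hBe] at this
      cases this
    obtain ⟨m', hBm, hBmem, hBmin⟩ := pvOMin_min _ hBne
    rw [hAm, hBm]
    refine congrArg some (le_antisymm ?_ ?_)
    · rcases (hB m').mp hBmem with ⟨wp, hwp, hpk, rfl⟩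
      rcases (hWP wp).mp hwp with ⟨g0, hg0⟩
      rcases pvMinDist_gaps l wp.1 wp.2 with ⟨_, hno⟩ | ⟨mv, hsome, hmemv, _⟩
      · exact absurd (show ((wp.1, wp.2), g0) ∈ pvPairsW l by simpa using hg0) (hno g0)
      · rw [hsome]
        simp only [Option.getD_some]
        exact hAmin mv ((hA mv).mpr ⟨wp, mv, by simpa using hmemv, hpk, rfl⟩)
    · rcases (hA m).mp hAmem with ⟨wp, g, hg, hpk, rfl⟩
      rcases pvMinDist_gaps l wp.1 wp.2 with ⟨_, hno⟩ | ⟨mv, hsome, hmemv, hminv⟩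
      · exact absurd (show ((wp.1, wp.2), m) ∈ pvPairsW l by simpa using hg) (hno m)
      · have hv : (pvMinDist (pvIdxs l wp.1) (pvIdxs l wp.2)).getD 0
            ∈ ((pvGroups l).filter (fun p => p.1 == k)).map (·.2) :=
          (hB _).mpr ⟨wp, (hWP wp).mpr ⟨m, hg⟩, hpk, rfl⟩
        have hb1 := hBmin _ hv
        rw [hsome] at hb1
        simp only [Option.getD_some] at hb1
        have hb2 := hminv m (by simpa using hg)
        omega

-- ---------- per-line equality and the verdict ----------

theorem pvLine_eq (line : List String) : pvALine line = pvLineColloc line := by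
  rw [pvB_line]
  unfold pvALine
  rw [pvDouble_eq_flat]
  have hposA : ∀ p ∈ pvLA line, 0 < p.2 := by
    intro p hp
    unfold pvLA at hp
    rcases List.mem_map.mp hp with ⟨q, hq, rfl⟩
    exact pvPairsW_pos line q hq
  have hposB := pvGroups_pos line
  have hvalsE : ∀ v ∈ (PySem.Dict.empty : PySem.Dict String Int).values, 0 < v := by
    intro v hv
    cases hv
  have hndE : (PySem.Dict.empty : PySem.Dict String Int).keys.Nodup := by
    rw [PySem.Dict.keys_empty]
    exact List.nodup_nil
  rw [pvStepA_eq_M _ _ hposA hvalsE hndE, pvStepB_eq_M _ _ hposB hvalsE hndE]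
  have hndB : ((pvGroups line).foldl pvStepM PySem.Dict.empty).keys.Nodup := by
    rw [pvStepM_keys, PySem.Dict.keys_empty]
    exact PySem.Set.nodup_update _ _ List.nodup_nil
  rw [PySem.Dict.items_eq_map_keys _ hndB 0, List.map_map]
  have hkeys : ((pvLA line).foldl pvStepM PySem.Dict.empty).keys
      = ((pvGroups line).foldl pvStepM PySem.Dict.empty).keys := by
    rw [pvStepM_keys, pvStepM_keys, PySem.Dict.keys_empty, PySem.Set.update_nil_left,
      PySem.Set.update_nil_left]
    have ha : (pvLA line).map (·.1) = (pvWPairs line).map (fun wp => pvPat wp.1 wp.2) := by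
      unfold pvLA pvWPairs
      rw [List.map_map, List.map_map]
      exact List.map_congr_left (fun q _ => rfl)
    have hb : (pvGroups line).map (·.1) = (pvGroupPairs line).map (fun wp => pvPat wp.1 wp.2) := by
      unfold pvGroups
      rw [List.map_map]
      exact List.map_congr_left (fun q _ => rfl)
    rw [ha, hb, pvGroupPairs_eq_dedup, PySem.List.dedup_eq_ofList]
    exact pvOfListMapOfList _ (pvWPairs line)
  rw [← hkeys]
  refine List.map_congr_left (fun k hk => ?_)
  simp only [Function.comp_apply]
  have hvA : ((pvLA line).foldl pvStepM PySem.Dict.empty).getD k 0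
      = (pvOMin none (((pvLA line).filter (fun p => p.1 == k)).map (·.2))).getD 0 := by
    rw [PySem.Dict.getD_eq_get?_getD, pvStepM_get?, PySem.Dict.get?_empty]
  have hvB : ((pvGroups line).foldl pvStepM PySem.Dict.empty).getD k 0
      = (pvOMin none (((pvGroups line).filter (fun p => p.1 == k)).map (·.2))).getD 0 := by
    rw [PySem.Dict.getD_eq_get?_getD, pvStepM_get?, PySem.Dict.get?_empty]
  rw [hvA, hvB, pvVals_agree]

-- ===== VERDICT (by name: the statement is the Claim_ definition above) =====
theorem buildCollocContext_spec : Claim_equal_buildCollocContext := by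
  intro content _
  unfold Spec_buildCollocContext
  rw [pvA_map, pvB_map]
  exact List.map_congr_left (fun line _ => pvLine_eq line)
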